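-- pv_equiv track=rewrite | github.com/xuan-ter/MIR_LLVM_Experiment | async_state_machine_bench/experiment_async_state_machine_mir_llvm.py | pick_baseline_combo
-- ===== SOURCE A (Python) =====
-- def pick_baseline_combo(combos):
--     for c in combos:
--         name = c.get("name") or c.get("Experiment_ID") or ""
--         if name == "EXP_DBL_000_BASELINE":
--             return c
--     for c in combos:
--         name = c.get("name") or c.get("Experiment_ID") or ""
--         if name == "EXP_000_ALL_OFF":
--             return c
--     return combos[0] if combos else None
-- ===== SOURCE B (Python) =====
-- def pick_baseline_combo(combos):
--     if not combos:
--         return None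
--     def rank(c):
--         name = c.get("name") or c.get("Experiment_ID") or ""
--         if name == "EXP_DBL_000_BASELINE":
--             return 0
--         if name == "EXP_000_ALL_OFF":
--             return 1
--         return 2
--     return min(combos, key=rank)
-- ===== Notes on version B (the rewrite author's own statement) =====
-- stated objective: alternative
-- what changed: Replaces A's two sequential priority scans plus fallback with a single keyed min over a priority rank (0=BASELINE, 1=ALL_OFF, 2=other); Python's stable min returns the first element of minimal rank, which is exactly A's choice.
import Mathlib
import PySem

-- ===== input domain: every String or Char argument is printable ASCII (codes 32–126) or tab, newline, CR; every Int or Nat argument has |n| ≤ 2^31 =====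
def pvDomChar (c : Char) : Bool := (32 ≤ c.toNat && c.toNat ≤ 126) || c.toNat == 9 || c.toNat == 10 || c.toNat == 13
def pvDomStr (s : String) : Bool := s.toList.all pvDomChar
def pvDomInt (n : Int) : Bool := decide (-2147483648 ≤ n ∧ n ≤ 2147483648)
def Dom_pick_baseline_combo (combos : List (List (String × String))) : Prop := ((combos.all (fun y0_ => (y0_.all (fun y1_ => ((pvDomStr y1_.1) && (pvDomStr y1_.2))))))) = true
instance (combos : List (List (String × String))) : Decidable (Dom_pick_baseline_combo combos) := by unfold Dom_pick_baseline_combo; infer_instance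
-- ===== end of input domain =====

-- B replaces A's two sequential priority scans with one stable keyed min over a
-- priority rank (objective: alternative); the two agree on every input.

-- shared helper: the Python line  name = c.get("name") or c.get("Experiment_ID") or ""
-- ('or' takes the left operand iff it is a truthy, i.e. nonempty, string)
def pvOrStr (o : Option String) (b : String) : String :=
  match o with
  | some s => if s == "" then b else s
  | none => b

def pvNameOf (c : List (String × String)) : String :=
  pvOrStr ((PySem.Dict.mk c).get? "name")
    (pvOrStr ((PySem.Dict.mk c).get? "Experiment_ID") "")

-- ===== PORT A =====
-- first loop: return the first combo whose name is EXP_DBL_000_BASELINE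
def pvScanBaseline : List (List (String × String)) → Option (List (String × String))
  | [] => none
  | c :: rest =>
      if pvNameOf c == "EXP_DBL_000_BASELINE" then some c else pvScanBaseline rest

-- second loop: return the first combo whose name is EXP_000_ALL_OFF
def pvScanAllOff : List (List (String × String)) → Option (List (String × String))
  | [] => none
  | c :: rest =>
      if pvNameOf c == "EXP_000_ALL_OFF" then some c else pvScanAllOff rest

def pick_baseline_combo (combos : List (List (String × String))) : Option (List (String × String)) :=
  match pvScanBaseline combos with
  | some c => some c
  | none =>
      match pvScanAllOff combos with
      | some c => some c
      | none =>
          match combos with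
          | [] => none
          | c :: _ => some c

-- ===== PORT B =====
-- Python's  rank(c): 0 for BASELINE, 1 for ALL_OFF, 2 otherwise
def pvRank (c : List (String × String)) : Int :=
  if pvNameOf c == "EXP_DBL_000_BASELINE" then 0
  else if pvNameOf c == "EXP_000_ALL_OFF" then 1
  else 2

-- min(combos, key=rank) is PySem.List.min? (first element of minimal key)
def pick_baseline_combo_alt (combos : List (List (String × String))) : Option (List (String × String)) :=
  match combos with
  | [] => none
  | _ => PySem.List.min? combos pvRank

-- ===== PRECONDITION & SPEC =====
def Spec_pick_baseline_combo (combos : List (List (String × String))) (out : Option (List (String × String))) : Prop := out = pick_baseline_combo_alt combos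
instance (combos : List (List (String × String))) (out : Option (List (String × String))) : Decidable (Spec_pick_baseline_combo combos out) := by unfold Spec_pick_baseline_combo; infer_instance

-- ===== CLAIM =====
def Claim_equal_pick_baseline_combo : Prop := ∀ (combos : List (List (String × String))), Dom_pick_baseline_combo combos → Spec_pick_baseline_combo combos (pick_baseline_combo combos)

-- ===== LEMMAS AND PROOFS =====

-- the folding step inside PySem.List.min?
def pvStep (acc : Option (List (String × String))) (x : List (String × String)) :
    Option (List (String × String)) :=
  match acc with
  | none => some x
  | some m => if pvRank x < pvRank m then some x else some m

theorem pvMin?_eq_foldl (xs : List (List (String × String))) :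
    PySem.List.min? xs pvRank = xs.foldl pvStep none := by
  unfold PySem.List.min? pvStep
  congr 1
  funext acc x
  cases acc <;> rfl

-- the fold with a seeded accumulator, characterised by A's two scans
theorem pvFoldl_some (xs : List (List (String × String))) (m : List (String × String)) :
    xs.foldl pvStep (some m) =
      if pvRank m = 0 then some m
      else match pvScanBaseline xs with
        | some c => some c
        | none =>
          if pvRank m = 1 then some m
          else match pvScanAllOff xs with
            | some c => some c
            | none => some m := by
  induction xs generalizing m with
  | nil =>
      simp only [List.foldl_nil, pvScanBaseline, pvScanAllOff]
      split_ifs <;> rfl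
  | cons x xs ih =>
      rw [List.foldl_cons]
      by_cases h : pvRank x < pvRank m
      · rw [show pvStep (some m) x = some x from by simp [pvStep, h]]
        rw [ih]
        by_cases hxb : pvNameOf x == "EXP_DBL_000_BASELINE" <;>
        by_cases hxa : pvNameOf x == "EXP_000_ALL_OFF" <;>
        by_cases hmb : pvNameOf m == "EXP_DBL_000_BASELINE" <;>
        by_cases hma : pvNameOf m == "EXP_000_ALL_OFF" <;>
          simp_all [pvRank, pvScanBaseline, pvScanAllOff]
      · rw [show pvStep (some m) x = some m from by simp [pvStep, h]]
        rw [ih]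
        by_cases hxb : pvNameOf x == "EXP_DBL_000_BASELINE" <;>
        by_cases hxa : pvNameOf x == "EXP_000_ALL_OFF" <;>
        by_cases hmb : pvNameOf m == "EXP_DBL_000_BASELINE" <;>
        by_cases hma : pvNameOf m == "EXP_000_ALL_OFF" <;>
          simp_all [pvRank, pvScanBaseline, pvScanAllOff]

theorem pvMin?_char (c : List (String × String)) (xs : List (List (String × String))) :
    PySem.List.min? (c :: xs) pvRank =
      match pvScanBaseline (c :: xs) with
      | some b => some b
      | none =>
        match pvScanAllOff (c :: xs) with
        | some b => some b
        | none => some c := by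
  rw [pvMin?_eq_foldl]
  simp only [List.foldl_cons, pvStep, pvFoldl_some, pvScanBaseline, pvScanAllOff, pvRank]
  by_cases hcb : pvNameOf c == "EXP_DBL_000_BASELINE" <;>
  by_cases hca : pvNameOf c == "EXP_000_ALL_OFF" <;>
    simp [hcb, hca]

-- ===== VERDICT =====
theorem pick_baseline_combo_spec : Claim_equal_pick_baseline_combo := by
  intro combos _
  unfold Spec_pick_baseline_combo pick_baseline_combo pick_baseline_combo_alt
  cases combos with
  | nil => simp [pvScanBaseline, pvScanAllOff]
  | cons c xs =>
      rw [pvMin?_char]
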